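-- pv_equiv track=rewrite | github.com/SalmanAsh/Leet-Code | Sliding Window/longest_substring_no_duplicaates.py | srf
-- ===== SOURCE A (Python) =====
-- def srf(s: str) -> int:
--     counts = []
--     l = 0
--     r = 1
--     while (l < len(s)-1):
--         if(s[l]!=s[r] and r == len(s) -1):
--             count = r - l + 1
--             counts.append(count)
--             l += 1
--             r = l + 1
--         elif(s[l]!=s[r]):
--             r += 1
--         elif(s[l]==s[r]):
--             count = r - l + 1
--             counts.append(count)
--             l += 1
--             r = l + 1
--     return max(counts)
-- ===== SOURCE B (Python) =====
-- def srf(s: str) -> int: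
--     # One right-to-left pass: nxt maps a char to its nearest occurrence to the
--     # right of the current position; span at l = (next equal char, or last
--     # index) - l + 1.
--     n = len(s)
--     nxt = {}
--     best = 0
--     for l in range(n - 2, -1, -1):
--         j = nxt.get(s[l], n - 1)
--         span = j - l + 1
--         if span > best:
--             best = span
--         nxt[s[l]] = l
--     return best
-- ===== Notes on version B (the rewrite author's own statement) =====
-- stated objective: faster
-- what changed: Replaces A's restart-the-inner-scan-from-l+1-for-every-l while loop by a single right-to-left pass that keeps a dict mapping each character to its nearest occurrence to the right, so the next-equal-char index is a O(1) lookup.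
import Mathlib
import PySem

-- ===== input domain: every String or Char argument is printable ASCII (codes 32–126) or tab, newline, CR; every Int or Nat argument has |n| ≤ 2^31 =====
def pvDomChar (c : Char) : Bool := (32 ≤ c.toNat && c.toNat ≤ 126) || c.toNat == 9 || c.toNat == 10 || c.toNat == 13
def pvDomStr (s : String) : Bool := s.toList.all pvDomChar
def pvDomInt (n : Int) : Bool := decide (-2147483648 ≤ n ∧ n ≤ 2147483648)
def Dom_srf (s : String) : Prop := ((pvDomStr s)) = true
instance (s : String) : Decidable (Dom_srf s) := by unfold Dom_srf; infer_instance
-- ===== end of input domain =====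

-- B replaces A's quadratic forward rescans by one right-to-left pass with a dict of
-- nearest next occurrences (objective: faster). Return-value equivalence on strings of
-- length ≥ 2 (A raises ValueError on shorter input).

-- ===== PORT A =====
-- A's while loop, fuel-indexed (the fuel bound used by srf is proved sufficient below).
-- Indices use Nat and List.getD: every s[l]/s[r] A actually evaluates is in range
-- (0 ≤ l < r ≤ len-1), so getD is exact there.
def srfLoopA (cs : List Char) : Nat → Nat → Nat → List Int → List Int
  | 0, _, _, counts => counts
  | fuel+1, l, r, counts =>
    if l + 1 < cs.length then
      if (cs.getD l ' ' != cs.getD r ' ') && (r == cs.length - 1) then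
        srfLoopA cs fuel (l+1) (l+2) (counts ++ [(r : Int) - (l : Int) + 1])
      else if cs.getD l ' ' != cs.getD r ' ' then
        srfLoopA cs fuel l (r+1) counts
      else
        srfLoopA cs fuel (l+1) (l+2) (counts ++ [(r : Int) - (l : Int) + 1])
    else counts

def srf (s : String) : Int :=
  -- max(counts): none = ValueError on the empty counts list, excluded by Pre_srf
  (PySem.List.max?
    (srfLoopA s.toList ((s.toList.length + 1) * (s.toList.length + 1)) 0 1 [])
    (fun x => x)).getD 0

-- ===== PORT B =====
-- one iteration of B's for-loop: body of 'for l in range(n-2, -1, -1)'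
def srfStep (s : String) (st : PySem.Dict Char Int × Int) (l : Int) : PySem.Dict Char Int × Int :=
  let c := (PySem.Str.pyGet? s l).getD ' '          -- s[l]: in range for every l the loop visits
  let j := (st.1.get? c).getD (PySem.Str.len s - 1) -- nxt.get(s[l], n-1)
  let span := j - l + 1
  (st.1.insert c l, if span > st.2 then span else st.2)

def srf_alt (s : String) : Int :=
  ((PySem.List.pyRange (PySem.Str.len s - 2) (-1) (-1)).foldl (srfStep s)
    (PySem.Dict.empty, 0)).2

-- ===== PRECONDITION & SPEC =====
-- A computes max(counts) of an empty list (ValueError) when len(s) < 2; those inputs are excluded.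
def Pre_srf (s : String) : Prop := 2 ≤ s.toList.length
instance (s : String) : Decidable (Pre_srf s) := by unfold Pre_srf; infer_instance
def pvWitness_srf : String := "ab"

def Spec_srf (s : String) (out : Int) : Prop := out = srf_alt s
instance (s : String) (out : Int) : Decidable (Spec_srf s out) := by unfold Spec_srf; infer_instance

-- ===== CLAIM (what is proved, stated in full; the proofs are below) =====
def Claim_equal_srf : Prop := ∀ (s : String), Dom_srf s → Pre_srf s → Spec_srf s (srf s)

-- ===== LEMMAS AND PROOFS =====

-- index of the first occurrence of c at a position ≥ r that A's inner scan still tests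
-- (A never tests position len-1 for equality before stopping there)
def nextOcc (cs : List Char) (c : Char) (r : Nat) : Option Nat :=
  if r + 1 < cs.length then
    (if cs.getD r ' ' = c then some r else nextOcc cs c (r+1))
  else none
termination_by cs.length - r

def stopIdx (cs : List Char) (c : Char) (r : Nat) : Nat :=
  (nextOcc cs c r).getD (cs.length - 1)

def spanAt (cs : List Char) (l : Nat) : Int :=
  (stopIdx cs (cs.getD l ' ') (l+1) : Int) - (l : Int) + 1

def spansAll (cs : List Char) (l : Nat) : List Int :=
  if l + 1 < cs.length then spanAt cs l :: spansAll cs (l+1) else []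
termination_by cs.length - l

def pureMax (cs : List Char) : Nat → Int
  | 0 => spanAt cs 0
  | l+1 => max (pureMax cs l) (spanAt cs (l+1))

def muA (n l r : Nat) : Nat := (n - l) * (n + 1) + (n - r)

theorem stopIdx_ge (cs : List Char) (c : Char) (r : Nat) (h : r + 1 ≤ cs.length) :
    r ≤ stopIdx cs c r := by
  unfold stopIdx
  rw [nextOcc]
  split
  · split
    · simp
    · have := stopIdx_ge cs c (r+1) (by omega)
      unfold stopIdx at this
      omega
  · simp; omega
termination_by cs.length - r

theorem spanAt_pos (cs : List Char) (l : Nat) (h : l + 1 < cs.length) : 2 ≤ spanAt cs l := by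
  have := stopIdx_ge cs (cs.getD l ' ') (l+1) (by omega)
  unfold spanAt
  omega

theorem srfLoopA_stop (cs : List Char) (fuel l r : Nat) (counts : List Int)
    (h : ¬ l + 1 < cs.length) : srfLoopA cs fuel l r counts = counts := by
  cases fuel <;> simp [srfLoopA, h]

theorem muA_dec_l (n l r : Nat) (h : l + 1 < n) : muA n (l+1) (l+2) < muA n l r := by
  unfold muA
  have h1 : n - l = (n - l - 1) + 1 := by omega
  have h2 : ((n - l - 1) + 1) * (n + 1) = (n - l - 1) * (n + 1) + (n + 1) := by ring
  rw [h1, h2]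
  have h3 : n - (l+1) = n - l - 1 := by omega
  rw [h3]
  omega

theorem srfLoopA_spec (cs : List Char) (fuel : Nat) : ∀ (l r : Nat) (counts : List Int),
    l + 1 < cs.length → l < r → r < cs.length → muA cs.length l r ≤ fuel →
    srfLoopA cs fuel l r counts =
      counts ++ ((stopIdx cs (cs.getD l ' ') r : Int) - (l : Int) + 1) :: spansAll cs (l+1) := by
  induction fuel with
  | zero =>
    intro l r counts hl hlr hr hmu
    exfalso
    have : (cs.length + 1) ≤ (cs.length - l) * (cs.length + 1) :=
      Nat.le_mul_of_pos_left _ (by omega)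
    unfold muA at hmu
    omega
  | succ fuel ih =>
    intro l r counts hl hlr hr hmu
    have hemit : ∀ (hstop : stopIdx cs (cs.getD l ' ') r = r),
        (counts ++ [(r : Int) - (l : Int) + 1]) ++ spansAll cs (l+1) =
        counts ++ ((stopIdx cs (cs.getD l ' ') r : Int) - (l : Int) + 1) :: spansAll cs (l+1) := by
      intro hstop
      rw [hstop]
      simp
    have hrec : srfLoopA cs fuel (l+1) (l+2) (counts ++ [(r : Int) - (l : Int) + 1]) =
        (counts ++ [(r : Int) - (l : Int) + 1]) ++ spansAll cs (l+1) := by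
      by_cases h2 : l + 2 < cs.length
      · rw [ih (l+1) (l+2) _ h2 (by omega) h2 (by have := muA_dec_l cs.length l r hl; omega)]
        conv_rhs => rw [spansAll]
        simp [h2, spanAt]
      · rw [srfLoopA_stop cs fuel (l+1) (l+2) _ (by omega)]
        conv_rhs => rw [spansAll]
        simp [h2]
    rw [srfLoopA, if_pos hl]
    by_cases hab : cs.getD l ' ' = cs.getD r ' '
    · -- third branch: s[l] == s[r]
      have hb : (cs.getD l ' ' != cs.getD r ' ') = false := bne_eq_false_iff_eq.mpr hab
      rw [hb]
      rw [if_neg (by simp), if_neg (by simp)]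
      have hstop : stopIdx cs (cs.getD l ' ') r = r := by
        unfold stopIdx
        rw [nextOcc]
        by_cases hrlen : r + 1 < cs.length
        · rw [if_pos hrlen, if_pos hab.symm]
          rfl
        · rw [if_neg hrlen]
          simp only [Option.getD_none]
          omega
      rw [hrec, hemit hstop]
    · have hb : (cs.getD l ' ' != cs.getD r ' ') = true := bne_iff_ne.mpr hab
      by_cases hrl : r = cs.length - 1
      · -- first branch
        have hbe : (r == cs.length - 1) = true := beq_iff_eq.mpr hrl
        rw [hb, hbe]
        simp only [Bool.and_self]
        rw [if_pos trivial]
        have hstop : stopIdx cs (cs.getD l ' ') r = r := by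
          unfold stopIdx
          rw [nextOcc]
          rw [if_neg (by omega)]
          simp only [Option.getD_none]
          omega
        rw [hrec, hemit hstop]
      · -- middle branch
        have hbe : (r == cs.length - 1) = false := beq_eq_false_iff_ne.mpr hrl
        rw [hb, hbe]
        rw [if_neg (by simp), if_pos rfl]
        have hr1 : r + 1 < cs.length := by omega
        rw [ih l (r+1) counts hl (by omega) hr1 (by unfold muA at *; omega)]
        have hstop : stopIdx cs (cs.getD l ' ') r = stopIdx cs (cs.getD l ' ') (r+1) := by
          unfold stopIdx
          conv_lhs => rw [nextOcc]
          rw [if_pos hr1, if_neg (fun h => hab h.symm)]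
        rw [hstop]

theorem foldl_max_range (cs : List Char) (m : Nat) : ∀ x : Int,
    ((List.range (m+1)).map (spanAt cs)).foldl max x = max x (pureMax cs m) := by
  induction m with
  | zero => intro x; simp [pureMax]
  | succ m ih =>
    intro x
    rw [List.range_succ, List.map_append, List.foldl_append, ih]
    simp [pureMax, max_assoc]

theorem spansAll_eq (cs : List Char) (l : Nat) :
    spansAll cs l = (List.range' l (cs.length - 1 - l)).map (spanAt cs) := by
  rw [spansAll]
  split
  · rename_i h
    have h1 : cs.length - 1 - l = (cs.length - 1 - (l+1)) + 1 := by omega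
    rw [h1, List.range'_succ, List.map_cons, spansAll_eq cs (l+1)]
  · rename_i h
    have h1 : cs.length - 1 - l = 0 := by omega
    simp [h1]
termination_by cs.length - l

-- B's loop body at a Nat position l, under the dict invariant
theorem srfStep_eval (s : String) (d : PySem.Dict Char Int) (best : Int) (l : Nat)
    (hl : l + 1 < s.toList.length)
    (hinv : ∀ c : Char, d.get? c = Option.map Int.ofNat (nextOcc s.toList c (l+1))) :
    srfStep s (d, best) ((l : Nat) : Int) =
      (d.insert (s.toList.getD l ' ') ((l : Nat) : Int), max best (spanAt s.toList l)) := by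
  have hc : (PySem.Str.pyGet? s ((l : Nat) : Int)).getD ' ' = s.toList.getD l ' ' := by
    simp [List.getD_eq_getElem?_getD]
  have hj : ((d.get? (s.toList.getD l ' ')).getD (PySem.Str.len s - 1)) =
      ((stopIdx s.toList (s.toList.getD l ' ') (l+1) : Nat) : Int) := by
    rw [hinv]
    unfold stopIdx
    cases h : nextOcc s.toList (s.toList.getD l ' ') (l+1)
    · simp only [Option.map_none, Option.getD_none, PySem.Str.len_eq]
      omega
    · simp only [Option.map_some, Option.getD_some, Int.ofNat_eq_natCast]
  simp only [srfStep]
  rw [hc, hj]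
  simp only [Prod.mk.injEq]
  refine ⟨by trivial, ?_⟩
  unfold spanAt
  split_ifs with hgt
  · exact (max_eq_right (by omega)).symm
  · exact (max_eq_left (by omega)).symm

theorem bLoop_spec (s : String) (l : Nat) :
    ∀ (d : PySem.Dict Char Int) (best : Int),
    l + 1 < s.toList.length →
    (∀ c : Char, d.get? c = Option.map Int.ofNat (nextOcc s.toList c (l+1))) →
    (((List.range (l+1)).map (fun k : Nat => ((l : Nat) : Int) - (k : Int))).foldl
      (srfStep s) (d, best)).2
    = max best (pureMax s.toList l) := by
  induction l with
  | zero =>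
    intro d best hl hinv
    have e1 : (List.range (0+1)).map (fun k : Nat => ((0 : Nat) : Int) - (k : Int)) =
        [((0 : Nat) : Int)] := by simp
    rw [e1, List.foldl_cons, srfStep_eval s d best 0 hl hinv, List.foldl_nil]
    rfl
  | succ l ih =>
    intro d best hl hinv
    have hsplit : (List.range (l+2)).map (fun k : Nat => ((l+1 : Nat) : Int) - (k : Int)) =
        (((l+1 : Nat) : Int)) :: (List.range (l+1)).map (fun k : Nat => ((l : Nat) : Int) - (k : Int)) := by
      rw [List.range_succ_eq_map, List.map_cons, List.map_map]
      refine List.cons_eq_cons.mpr ⟨by push_cast; ring, ?_⟩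
      apply List.map_congr_left
      intro k _
      simp only [Function.comp]
      push_cast
      ring
    rw [hsplit, List.foldl_cons, srfStep_eval s d best (l+1) hl hinv]
    rw [ih _ _ (by omega) ?_]
    · rw [pureMax, max_assoc, max_comm (spanAt s.toList (l+1)) (pureMax s.toList l)]
    · -- invariant preserved by the insert at l+1
      intro c
      rw [PySem.Dict.get?_insert]
      conv_rhs => rw [nextOcc]
      have h2 : l + 1 + 1 < s.toList.length := hl
      rw [if_pos h2]
      by_cases hcc : c = s.toList.getD (l+1) ' '
      · rw [if_pos hcc, if_pos hcc.symm]
        rfl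
      · rw [if_neg hcc, if_neg (fun h => hcc h.symm), hinv]

-- ===== VERDICT (by name: the statement is the Claim_ definition above) =====
theorem srf_spec : Claim_equal_srf := by
  intro s _ hpre
  unfold Spec_srf srf srf_alt Pre_srf at *
  have hlen : 2 ≤ s.toList.length := hpre
  set cs := s.toList with hcs
  set m : Nat := cs.length - 2 with hm
  -- A side: counts = spansAll cs 0 = (range (m+1)).map (spanAt cs)
  have hfuel : muA cs.length 0 1 ≤ (cs.length + 1) * (cs.length + 1) := by
    unfold muA
    simp only [Nat.sub_zero]
    have : (cs.length + 1) * (cs.length + 1) =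
        cs.length * (cs.length + 1) + (cs.length + 1) := by ring
    omega
  rw [srfLoopA_spec cs _ 0 1 [] (by omega) (by omega) (by omega) hfuel]
  have hcounts : ([] : List Int) ++ ((stopIdx cs (cs.getD 0 ' ') 1 : Int) - ((0:Nat) : Int) + 1)
      :: spansAll cs 1 = (List.range (m+1)).map (spanAt cs) := by
    have h0 : ((stopIdx cs (cs.getD 0 ' ') 1 : Int) - ((0:Nat) : Int) + 1) = spanAt cs 0 := by
      unfold spanAt; norm_num
    have h1 : spansAll cs 0 = spanAt cs 0 :: spansAll cs 1 := by
      rw [spansAll]; simp [show (0:Nat) + 1 < cs.length by omega]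
    rw [List.nil_append, h0, ← h1, spansAll_eq]
    have h2 : cs.length - 1 - 0 = m + 1 := by omega
    rw [h2, ← List.range_eq_range']
  rw [hcounts]
  -- A's max over the nonempty list equals the 0-seeded running max
  have hA : ((PySem.List.max? ((List.range (m+1)).map (spanAt cs)) (fun x => x)).getD 0)
      = max 0 (pureMax cs m) := by
    rw [List.range_succ_eq_map, List.map_cons]
    rw [PySem.List.max?_id_cons]
    have hpos : (0 : Int) ≤ spanAt cs 0 := by
      have := spanAt_pos cs 0 (by omega); omega
    have := foldl_max_range cs m 0
    rw [List.range_succ_eq_map, List.map_cons, List.foldl_cons] at this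
    rw [max_eq_right hpos] at this
    simp only [Option.getD_some]
    exact this
  rw [hA]
  -- B side
  have hrange : PySem.List.pyRange (PySem.Str.len s - 2) (-1) (-1) =
      (List.range (m+1)).map (fun k : Nat => ((m : Nat) : Int) - (k : Int)) := by
    rw [PySem.List.pyRange_neg_one]
    have h1 : (PySem.Str.len s - 2 - (-1)).toNat = m + 1 := by
      simp only [PySem.Str.len_eq]
      rw [← hcs]
      omega
    rw [h1]
    apply List.map_congr_left
    intro k _
    simp only [PySem.Str.len_eq]
    rw [← hcs]
    omega
  rw [hrange]
  rw [bLoop_spec s m PySem.Dict.empty 0 (by rw [← hcs]; omega) ?_]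
  · intro c
    rw [PySem.Dict.get?_empty, nextOcc, if_neg (by rw [← hcs]; omega)]
    rfl
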